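-- pv_equiv track=rewrite | github.com/mordecaimalignatius/GAFAR | utils/misc.py | merge_dict_default
-- ===== SOURCE A (Python) =====
-- from copy import copy
--
-- def merge_dict_default(default: dict, other: dict) -> dict:
--     """ same as merge_dict, but the output will only contain keys present default dict """
--     merged = copy(default)
--
--     for key in other.keys():
--         if key in merged:
--             if isinstance(merged[key], dict) and isinstance(other[key], dict):
--                 merged[key] = merge_dict_default(merged[key], other[key])
--
--             else:
--                 merged[key] = copy(other[key])
--
--     return merged
-- ===== SOURCE B (Python) =====
-- from copy import copy
--
-- def _merge_value(val, oval):
--     if isinstance(val, dict) and isinstance(oval, dict):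
--         return merge_dict_default(val, oval)
--     return copy(oval)
--
-- def merge_dict_default(default: dict, other: dict) -> dict:
--     """ same as merge_dict, but the output will only contain keys present default dict """
--     return {key: _merge_value(val, other[key]) if key in other else val
--             for key, val in default.items()}
-- ===== Notes on version B (the rewrite author's own statement) =====
-- stated objective: simpler
-- what changed: B is a single dict comprehension over default.items() that picks other's (recursively merged) value when the key is present, instead of A's copy-then-patch loop over other's keys with in-place insertion.
import Mathlib
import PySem

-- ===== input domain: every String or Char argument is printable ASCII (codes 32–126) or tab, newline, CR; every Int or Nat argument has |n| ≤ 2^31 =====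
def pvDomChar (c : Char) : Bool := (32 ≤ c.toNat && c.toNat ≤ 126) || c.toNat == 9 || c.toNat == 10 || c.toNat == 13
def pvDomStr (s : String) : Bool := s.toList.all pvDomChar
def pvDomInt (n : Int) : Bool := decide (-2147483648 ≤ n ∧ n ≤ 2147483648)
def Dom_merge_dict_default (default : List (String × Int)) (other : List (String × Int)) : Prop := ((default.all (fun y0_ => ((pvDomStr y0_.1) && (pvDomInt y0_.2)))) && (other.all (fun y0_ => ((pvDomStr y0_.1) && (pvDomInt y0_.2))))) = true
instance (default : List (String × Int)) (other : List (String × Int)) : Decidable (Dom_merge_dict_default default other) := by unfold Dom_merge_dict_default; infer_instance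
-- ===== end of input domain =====

-- B replaces A's copy-then-patch loop over other's keys by a single comprehension over default.items().
-- At this monomorphic type the values are Int, so Python's `isinstance(..., dict)` test is always False
-- in both programs and `copy` of an int is the int itself.

-- ===== PORT A =====
-- merged = copy(default); for key in other.keys(): if key in merged: merged[key] = other[key]
def merge_dict_default (default : List (String × Int)) (other : List (String × Int)) : List (String × Int) :=
  let od := PySem.Dict.ofList other
  ((od.keys).foldl
    (fun m key => if m.contains key then m.insert key (od.getD key 0) else m)
    (PySem.Dict.ofList default)).items

-- ===== PORT B =====
-- _merge_value(val, oval): values are Int here, so the isinstance branch never fires and copy(oval) = oval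
def pvMergeValue (_val oval : Int) : Int := oval

-- {key: _merge_value(val, other[key]) if key in other else val for key, val in default.items()}
def merge_dict_default_alt (default : List (String × Int)) (other : List (String × Int)) : List (String × Int) :=
  (PySem.Dict.ofList default).items.map
    (fun kv =>
      (kv.1, match (PySem.Dict.ofList other).get? kv.1 with
             | some ov => pvMergeValue kv.2 ov
             | none => kv.2))

-- ===== PRECONDITION & SPEC =====
def Spec_merge_dict_default (default : List (String × Int)) (other : List (String × Int)) (out : List (String × Int)) : Prop := out = merge_dict_default_alt default other
instance (default : List (String × Int)) (other : List (String × Int)) (out : List (String × Int)) : Decidable (Spec_merge_dict_default default other out) := by unfold Spec_merge_dict_default; infer_instance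

-- ===== CLAIM =====
def Claim_equal_merge_dict_default : Prop := ∀ (default : List (String × Int)) (other : List (String × Int)), Dom_merge_dict_default default other → Spec_merge_dict_default default other (merge_dict_default default other)

-- ===== LEMMAS AND PROOFS =====

-- A's loop over `ks`, starting from any dict with unique keys, rewrites exactly the items whose key occurs in `ks`.
theorem pv_foldA_items (od : PySem.Dict String Int) (ks : List String)
    (m : PySem.Dict String Int) (hnd : m.keys.Nodup) :
    (ks.foldl (fun m key => if m.contains key then m.insert key (od.getD key 0) else m) m).items
      = m.items.map (fun kv => if kv.1 ∈ ks then (kv.1, od.getD kv.1 0) else kv) := by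
  induction ks generalizing m with
  | nil => simp
  | cons k ks ih =>
    simp only [List.foldl_cons]
    by_cases hc : m.contains k = true
    · rw [if_pos hc, ih _ (PySem.Dict.nodup_keys_insert m k (od.getD k 0) hnd)]
      rw [PySem.Dict.items_insert_of_contains _ _ hc, List.map_map]
      refine List.map_congr_left ?_
      intro p _
      by_cases hk : p.1 = k
      · simp [Function.comp, hk]
      · simp [Function.comp, hk]
    · rw [if_neg (by simp [hc]), ih _ hnd]
      refine List.map_congr_left ?_
      intro p hp
      have hk : p.1 ≠ k := by
        intro h
        apply hc
        rw [PySem.Dict.contains_iff_mem_keys, ← h]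
        exact PySem.Dict.mem_keys_of_mem_items _ hp
      simp [hk]

-- ===== VERDICT =====
theorem merge_dict_default_spec : Claim_equal_merge_dict_default := by
  intro default other _
  unfold Spec_merge_dict_default merge_dict_default merge_dict_default_alt
  set od := PySem.Dict.ofList other with hod
  set dd := PySem.Dict.ofList default with hdd
  have hnd : dd.keys.Nodup := PySem.Dict.nodup_keys_ofList default
  rw [pv_foldA_items od od.keys dd hnd]
  refine List.map_congr_left ?_
  intro p _
  cases hg : od.get? p.1 with
  | some v =>
    have hmem : p.1 ∈ od.keys := by
      by_contra hk
      rw [(PySem.Dict.get?_eq_none_iff_not_mem_keys od p.1).2 hk] at hg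
      cases hg
    simp [hmem, pvMergeValue, PySem.Dict.getD_eq_get?_getD, hg]
  | none =>
    have hk : p.1 ∉ od.keys := (PySem.Dict.get?_eq_none_iff_not_mem_keys od p.1).1 hg
    simp [hk]
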